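-- pv_equiv track=rewrite | github.com/Wang-kaifei/PythonScript | pAnno_python/Res_Judge_High.py | ILExtend
-- ===== SOURCE A (Python) =====
-- def ILExtend(pep):
--     if "L" not in pep and "I" not in pep:
--         return [pep]
--     res = []
--     pos = []
--     for i in range (len(pep)): # 存储所有出现IL的位置
--         if pep[i] == "L" or pep[i] == "I":
--             pos.append(i)
--     cnt = pow(2, len(pos))
--     s = list(pep)
--     for i in range(cnt):
--         code = bin(i)[2:].zfill(len(pos))
--         for j in range(len(code)):
--             if code[j] == "1": # "L"
--                 s[pos[j]] = "L"
--             else: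
--                 s[pos[j]] = "I"
--         new_pep = ''.join(s)
--         res.append(new_pep)
--     return res
-- ===== SOURCE B (Python) =====
-- def ILExtend(pep):
--     res = ['']
--     for ch in pep:
--         if ch in 'IL':
--             res = [r + c for r in res for c in 'IL']
--         else:
--             res = [r + ch for r in res]
--     return res
-- ===== Notes on version B (the rewrite author's own statement) =====
-- stated objective: simpler
-- what changed: Replaces the position table plus bin/zfill binary-code enumeration over 2^k counters (with an in-place mutated char list) by a single left-to-right fold that doubles the prefix list at each I/L character.
import Mathlib
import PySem

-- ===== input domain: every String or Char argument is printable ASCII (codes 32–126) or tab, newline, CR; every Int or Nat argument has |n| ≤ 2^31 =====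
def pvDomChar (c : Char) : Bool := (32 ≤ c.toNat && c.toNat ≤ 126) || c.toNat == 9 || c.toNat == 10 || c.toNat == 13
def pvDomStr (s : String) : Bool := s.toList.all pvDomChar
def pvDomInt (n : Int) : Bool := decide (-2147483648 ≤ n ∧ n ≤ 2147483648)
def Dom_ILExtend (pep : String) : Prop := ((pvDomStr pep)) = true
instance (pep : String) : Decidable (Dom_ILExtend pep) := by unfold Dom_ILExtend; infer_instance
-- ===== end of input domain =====

-- B replaces A's position table and bin/zfill binary-code enumeration by one doubling fold over the characters; same return value, simpler code.

-- ===== PORT A =====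
-- bin(i)[2:] (binary digits of i, no prefix, '0' for 0)
def pvBin (n : Nat) : List Char :=
  if h : n < 2 then [Char.ofNat (48 + n)]
  else pvBin (n / 2) ++ [Char.ofNat (48 + n % 2)]
decreasing_by exact Nat.div_lt_self (by omega) (by omega)

-- str.zfill(w): pad with '0' on the left to width w
def pvZfill (s : List Char) (w : Nat) : List Char := List.replicate (w - s.length) '0' ++ s

def ILExtend (pep : String) : List String :=
  if ¬ PySem.Str.isIn "L" pep ∧ ¬ PySem.Str.isIn "I" pep then [pep]
  else
    let l := pep.toList
    let pos : List Nat := (List.range l.length).foldl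
      (fun acc i => if l.getD i ' ' = 'L' ∨ l.getD i ' ' = 'I' then acc ++ [i] else acc) []
    let cnt := 2 ^ pos.length
    let r := (List.range cnt).foldl (fun (st : List Char × List String) i =>
      let code := pvZfill (pvBin i) pos.length
      let s := (List.range code.length).foldl (fun s j =>
        if code.getD j ' ' = '1' then s.set (pos.getD j 0) 'L'
        else s.set (pos.getD j 0) 'I') st.1
      (s, st.2 ++ [String.ofList s])) (l, [])
    r.2

-- ===== PORT B =====
def ILExtend_alt (pep : String) : List String :=
  (pep.toList.foldl (fun res ch =>
      if ch = 'I' ∨ ch = 'L' then res.flatMap (fun r => [r ++ ['I'], r ++ ['L']])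
      else res.map (fun r => r ++ [ch])) [([] : List Char)]).map String.ofList

-- ===== PRECONDITION & SPEC =====
def Spec_ILExtend (pep : String) (out : List String) : Prop := out = ILExtend_alt pep
instance (pep : String) (out : List String) : Decidable (Spec_ILExtend pep out) := by unfold Spec_ILExtend; infer_instance

-- ===== CLAIM (what is proved, stated in full; the proofs are below) =====
def Claim_equal_ILExtend : Prop := ∀ (pep : String), Dom_ILExtend pep → Spec_ILExtend pep (ILExtend pep)

-- ===== LEMMAS AND PROOFS =====

-- the common value of both programs, recursively on the character list
def expandSpec : List Char → List (List Char)
  | [] => [[]]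
  | c :: cs =>
    if c = 'I' ∨ c = 'L'
    then (expandSpec cs).map ('I' :: ·) ++ (expandSpec cs).map ('L' :: ·)
    else (expandSpec cs).map (c :: ·)

-- the I/L positions of a list, recursively
def ilpos : List Char → List Nat
  | [] => []
  | c :: cs => if c = 'L' ∨ c = 'I' then 0 :: (ilpos cs).map (· + 1) else (ilpos cs).map (· + 1)

-- the code strings A enumerates
def codes (k : Nat) : List (List Char) := (List.range (2 ^ k)).map (fun i => pvZfill (pvBin i) k)

-- pairwise write of a code into s at positions pos
def writeIL (s : List Char) : List Nat → List Char → List Char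
  | p :: ps, c :: cs => writeIL (s.set p (if c = '1' then 'L' else 'I')) ps cs
  | _, _ => s

-- ---- B side ----
theorem alt_fold (cs : List Char) : ∀ (res : List (List Char)),
    cs.foldl (fun res ch =>
      if ch = 'I' ∨ ch = 'L' then res.flatMap (fun r => [r ++ ['I'], r ++ ['L']])
      else res.map (fun r => r ++ [ch])) res
    = res.flatMap (fun r => (expandSpec cs).map (r ++ ·)) := by
  induction cs with
  | nil => intro res; simp [expandSpec]
  | cons c cs ih =>
    intro res
    simp only [List.foldl_cons, expandSpec]
    by_cases h : c = 'I' ∨ c = 'L'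
    · simp only [if_pos h, ih]
      rw [List.flatMap_assoc]
      apply List.flatMap_congr
      intro r _
      simp only [List.flatMap_cons, List.flatMap_nil, List.append_nil, List.map_append,
        List.map_map, Function.comp_def]
      congr 1 <;> (apply List.map_congr_left; intro x _; simp)
    · simp only [if_neg h, ih]
      simp [List.flatMap_map, List.map_map, Function.comp_def]

theorem alt_eq_expand (pep : String) : ILExtend_alt pep = (expandSpec pep.toList).map String.ofList := by
  unfold ILExtend_alt
  rw [alt_fold]
  simp

-- ---- A side: positions ----
theorem pos_eq_ilpos (l : List Char) :
    (List.range l.length).foldl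
      (fun acc i => if l.getD i ' ' = 'L' ∨ l.getD i ' ' = 'I' then acc ++ [i] else acc) []
    = ilpos l := by
  rw [PySem.List.foldl_append_ite_eq_filter]
  simp only [List.nil_append]
  induction l with
  | nil => rfl
  | cons c cs ih =>
    rw [List.length_cons, List.range_succ_eq_map, List.filter_cons, List.filter_map]
    simp only [List.getD_cons_zero, ilpos]
    by_cases h : c = 'L' ∨ c = 'I'
    · rw [if_pos h, if_pos (by simpa using h)]
      rw [← ih]
      congr 1
    · rw [if_neg h, if_neg (by simpa using h)]
      rw [← ih]
      congr 1

theorem ilpos_pairwise (l : List Char) : (ilpos l).Pairwise (· < ·) := by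
  induction l with
  | nil => exact List.Pairwise.nil
  | cons c cs ih =>
    simp only [ilpos]
    split
    · refine List.Pairwise.cons ?_ ?_
      · intro p hp; simp only [List.mem_map] at hp; omega
      · rw [List.pairwise_map]; exact ih.imp (by omega)
    · rw [List.pairwise_map]; exact ih.imp (by omega)

theorem ilpos_nil_of_not_mem (l : List Char) (hL : 'L' ∉ l) (hI : 'I' ∉ l) : ilpos l = [] := by
  induction l with
  | nil => rfl
  | cons c cs ih =>
    simp only [List.mem_cons, not_or] at hL hI
    simp only [ilpos, if_neg (by tauto : ¬ (c = 'L' ∨ c = 'I'))]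
    rw [ih hL.2 hI.2]; rfl

-- ---- A side: binary codes ----
theorem pvBin_len_le (k : Nat) : ∀ i, i < 2 ^ k → 1 ≤ k → (pvBin i).length ≤ k := by
  induction k with
  | zero => omega
  | succ k ih =>
    intro i hi _
    rw [pvBin]
    split
    · simp
    · rename_i h
      have hk : 1 ≤ k := by
        by_contra hk
        have : k = 0 := by omega
        subst this; simp at hi; omega
      have : i / 2 < 2 ^ k := by
        have : 2 ^ (k + 1) = 2 * 2 ^ k := by ring
        omega
      have := ih (i / 2) this hk
      simp [List.length_append]; omega

theorem pvZfill_len (s : List Char) (w : Nat) (h : s.length ≤ w) : (pvZfill s w).length = w := by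
  simp [pvZfill]; omega

-- zfill at width w+1 just adds one '0' when the digits fit in width w
-- zfill pads nothing when already wide enough
theorem pvZfill_of_len_ge (s : List Char) (w : Nat) (h : w ≤ s.length) : pvZfill s w = s := by
  simp [pvZfill, Nat.sub_eq_zero_of_le h]

theorem pvZfill_succ (s : List Char) (w : Nat) (h : s.length ≤ w) :
    pvZfill s (w + 1) = '0' :: pvZfill s w := by
  unfold pvZfill
  rw [show w + 1 - s.length = (w - s.length) + 1 by omega, List.replicate_succ]
  rfl

theorem pvBin_high (k : Nat) : ∀ i, 1 ≤ k → i < 2 ^ k → pvBin (2 ^ k + i) = '1' :: pvZfill (pvBin i) k := by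
  induction k with
  | zero => omega
  | succ k ih =>
    intro i _ hi
    rw [pvBin]
    rw [dif_neg (by have : 1 ≤ 2 ^ k := Nat.one_le_two_pow; omega)]
    have hdiv : (2 ^ (k + 1) + i) / 2 = 2 ^ k + i / 2 := by
      have h2 : 2 ^ (k + 1) = 2 * 2 ^ k := by ring
      omega
    have hmod : (2 ^ (k + 1) + i) % 2 = i % 2 := by
      have h2 : 2 ^ (k + 1) = 2 * 2 ^ k := by ring
      omega
    rw [hdiv, hmod]
    rcases Nat.eq_or_lt_of_le (show 1 ≤ k + 1 from by omega) with hk1 | hk1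
    · -- k = 0 : i < 2, compute directly
      have hk0 : k = 0 := by omega
      subst hk0
      interval_cases i <;> simp [pvBin, pvZfill]
    · have hk : 1 ≤ k := by omega
      have hi2 : i / 2 < 2 ^ k := by
        have h2 : 2 ^ (k + 1) = 2 * 2 ^ k := by ring
        omega
      rw [ih (i / 2) hk hi2]
      rw [List.cons_append]
      congr 1
      -- pvZfill (pvBin (i/2)) k ++ [digit (i%2)] = pvZfill (pvBin i) (k+1)
      by_cases h2 : i < 2
      · have : i / 2 = 0 := by omega
        rw [this]
        have hb0 : pvBin 0 = ['0'] := by rw [pvBin]; simp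
        have hbi : pvBin i = [Char.ofNat (48 + i)] := by rw [pvBin]; simp [h2]
        have : i % 2 = i := by omega
        rw [hb0, hbi, this]
        unfold pvZfill
        simp only [List.length_cons, List.length_nil]
        rw [show k + 1 - 1 = (k - 1) + 1 by omega, List.replicate_succ']
      · have hbi : pvBin i = pvBin (i / 2) ++ [Char.ofNat (48 + i % 2)] := by
          rw [pvBin]; simp [h2]
        rw [hbi]
        have hlen : (pvBin (i / 2)).length ≤ k := pvBin_len_le k (i / 2) hi2 hk
        unfold pvZfill
        simp only [List.length_append, List.length_cons, List.length_nil]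
        rw [show k + 1 - ((pvBin (i / 2)).length + (0 + 1)) = k - (pvBin (i / 2)).length by omega]
        simp [List.append_assoc]

theorem codes_succ (k : Nat) (hk : 1 ≤ k) :
    codes (k + 1) = (codes k).map ('0' :: ·) ++ (codes k).map ('1' :: ·) := by
  unfold codes
  rw [show 2 ^ (k + 1) = 2 ^ k + 2 ^ k by ring, List.range_add, List.map_append]
  congr 1
  · rw [List.map_map]
    apply List.map_congr_left
    intro i hi
    rw [List.mem_range] at hi
    exact pvZfill_succ _ _ (pvBin_len_le k i hi hk)
  · rw [List.map_map, List.map_map]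
    apply List.map_congr_left
    intro i hi
    rw [List.mem_range] at hi
    have hlen : (pvBin i).length ≤ k := pvBin_len_le k i hi hk
    have : pvBin (2 ^ k + i) = '1' :: pvZfill (pvBin i) k := pvBin_high k i hk hi
    simp only [Function.comp_def, this]
    apply pvZfill_of_len_ge
    rw [List.length_cons, pvZfill_len _ _ hlen]

-- ---- A side: writes ----
theorem inner_fold_eq_writeIL (code : List Char) : ∀ (pos : List Nat), pos.length = code.length →
    ∀ s, (List.range code.length).foldl (fun s j =>
        if code.getD j ' ' = '1' then s.set (pos.getD j 0) 'L'
        else s.set (pos.getD j 0) 'I') s = writeIL s pos code := by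
  induction code with
  | nil =>
    intro pos h s
    cases pos with
    | nil => simp [writeIL]
    | cons p ps => simp at h
  | cons c cs ih =>
    intro pos h s
    cases pos with
    | nil => simp at h
    | cons p ps =>
      rw [List.length_cons, List.range_succ_eq_map, List.foldl_cons, List.foldl_map]
      have h' : ps.length = cs.length := by simpa using h
      have step : (if (c :: cs).getD 0 ' ' = '1' then s.set ((p :: ps).getD 0 0) 'L'
          else s.set ((p :: ps).getD 0 0) 'I') = s.set p (if c = '1' then 'L' else 'I') := by
        by_cases hc : c = '1' <;> simp [hc]
      rw [step]
      show _ = writeIL (s.set p (if c = '1' then 'L' else 'I')) ps cs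
      rw [← ih ps h' (s.set p (if c = '1' then 'L' else 'I'))]
      simp only [Nat.succ_eq_add_one, List.getD_cons_succ]

theorem writeIL_set_comm (ps : List Nat) (p : Nat) (hp : p ∉ ps) :
    ∀ (s : List Char) (x : Char) (c : List Char),
      writeIL (s.set p x) ps c = (writeIL s ps c).set p x := by
  induction ps with
  | nil => intro s x c; simp [writeIL]
  | cons q qs ih =>
    intro s x c
    cases c with
    | nil => rfl
    | cons a as =>
      simp only [List.mem_cons, not_or] at hp
      show writeIL (((s.set p x).set q _)) qs as = (writeIL (s.set q _) qs as).set p x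
      rw [List.set_comm _ _ hp.1]
      exact ih hp.2 (s.set q _) x as

theorem writeIL_overwrite (pos : List Nat) (hnd : pos.Nodup) :
    ∀ (c c' : List Char), c.length = c'.length →
      ∀ s, writeIL (writeIL s pos c) pos c' = writeIL s pos c' := by
  induction pos with
  | nil => intro c c' _ s; simp [writeIL]
  | cons p ps ih =>
    intro c c' hlen s
    rw [List.nodup_cons] at hnd
    cases c with
    | nil => cases c' with
      | nil => rfl
      | cons b bs => simp at hlen
    | cons a as =>
      cases c' with
      | nil => simp at hlen
      | cons b bs =>
        show writeIL ((writeIL (s.set p _) ps as).set p _) ps bs = writeIL (s.set p _) ps bs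
        rw [writeIL_set_comm ps p hnd.1, writeIL_set_comm ps p hnd.1,
          writeIL_set_comm ps p hnd.1, List.set_set,
          ih hnd.2 as bs (by simpa using hlen), ← writeIL_set_comm ps p hnd.1]

-- length of any code at width k (same for all i < 2^k)
theorem code_len (k : Nat) (i : Nat) (hi : i < 2 ^ k) :
    (pvZfill (pvBin i) k).length = if k = 0 then 1 else k := by
  by_cases hk : k = 0
  · subst hk
    have : i = 0 := by omega
    subst this
    rw [pvBin]
    simp [pvZfill]
  · rw [if_neg hk]
    exact pvZfill_len _ _ (pvBin_len_le k i hi (by omega))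

theorem main_fold (l : List Char) (pos : List Nat) (hnd : pos.Nodup) (hk1 : 1 ≤ pos.length) :
    ∀ (is : List Nat) (s : List Char) (res : List String),
      (∀ i ∈ is, i < 2 ^ pos.length) →
      (∀ c : List Char, c.length = pos.length → writeIL s pos c = writeIL l pos c) →
      ((is.foldl (fun (st : List Char × List String) i =>
        let code := pvZfill (pvBin i) pos.length
        let s := (List.range code.length).foldl (fun s j =>
          if code.getD j ' ' = '1' then s.set (pos.getD j 0) 'L'
          else s.set (pos.getD j 0) 'I') st.1
        (s, st.2 ++ [String.ofList s])) (s, res)).2)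
      = res ++ is.map (fun i => String.ofList (writeIL l pos (pvZfill (pvBin i) pos.length))) := by
  intro is
  induction is with
  | nil => intro s res _ _; simp
  | cons i is ih =>
    intro s res hmem hP
    have hi : i < 2 ^ pos.length := hmem i (List.mem_cons_self ..)
    have hcl : (pvZfill (pvBin i) pos.length).length = pos.length := by
      rw [code_len _ _ hi, if_neg (by omega)]
    rw [List.foldl_cons]
    simp only
    rw [inner_fold_eq_writeIL _ pos hcl.symm]
    rw [hP _ hcl]
    rw [ih (writeIL l pos (pvZfill (pvBin i) pos.length)) (res ++ [String.ofList (writeIL l pos (pvZfill (pvBin i) pos.length))])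
      (fun j hj => hmem j (List.mem_cons_of_mem _ hj))
      (fun c hc => writeIL_overwrite pos hnd _ c (by rw [hcl, hc]) l)]
    simp

-- ilpos is nonempty as soon as an 'L' or 'I' occurs
theorem ilpos_ne_nil (l : List Char) (h : 'L' ∈ l ∨ 'I' ∈ l) : ilpos l ≠ [] := by
  induction l with
  | nil => simp at h
  | cons c cs ih =>
    by_cases hc : c = 'L' ∨ c = 'I'
    · simp [ilpos, if_pos hc]
    · have : 'L' ∈ cs ∨ 'I' ∈ cs := by
        rcases h with h | h <;> rw [List.mem_cons] at h <;> tauto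
      simp only [ilpos, if_neg hc, ne_eq, List.map_eq_nil_iff]
      exact ih this

-- writing at shifted positions into a cons skips the head
theorem writeIL_cons_shift (c : Char) : ∀ (ps : List Nat) (code : List Char) (s : List Char),
    writeIL (c :: s) (ps.map (· + 1)) code = c :: writeIL s ps code := by
  intro ps
  induction ps with
  | nil => intro code s; simp [writeIL]
  | cons x xs ih =>
    intro code s
    cases code with
    | nil => simp [writeIL]
    | cons a as =>
      show writeIL ((c :: s).set (x + 1) _) (xs.map (· + 1)) as = c :: writeIL (s.set x _) xs as
      rw [List.set_cons_succ]
      exact ih as (s.set x _)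

-- pvBin on the two one-digit inputs
theorem pvBin_zero : pvBin 0 = ['0'] := by rw [pvBin]; simp
theorem pvBin_one : pvBin 1 = ['1'] := by rw [pvBin]; simp

-- ---- core: codes + writes = expandSpec ----
theorem core (l : List Char) :
    (codes (ilpos l).length).map (fun c => writeIL l (ilpos l) c) = expandSpec l := by
  induction l with
  | nil =>
    simp [codes, ilpos, expandSpec, pvBin_zero, pvZfill, writeIL]
  | cons c cs ih =>
    by_cases hc : c = 'L' ∨ c = 'I'
    · rw [show expandSpec (c :: cs)
          = (expandSpec cs).map ('I' :: ·) ++ (expandSpec cs).map ('L' :: ·) by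
        rw [expandSpec]; rw [if_pos (by tauto)]]
      simp only [ilpos, if_pos hc, List.length_cons, List.length_map]
      by_cases hk : (ilpos cs).length = 0
      · rw [List.length_eq_zero_iff] at hk
        rw [hk]
        have hE : expandSpec cs = [cs] := by
          rw [← ih, hk]
          simp [codes, pvBin_zero, pvZfill, writeIL]
        rw [hE]
        simp only [List.length_nil]
        rw [show codes (0 + 1) = [['0'], ['1']] by
          unfold codes
          rw [show List.range (2 ^ (0 + 1)) = [0, 1] from rfl]
          simp [pvBin_zero, pvBin_one, pvZfill]]
        simp [writeIL]
      · have hk1 : 1 ≤ (ilpos cs).length := by omega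
        rw [codes_succ _ hk1, List.map_append, List.map_map, List.map_map, ← ih]
        congr 1
        · rw [List.map_map]
          apply List.map_congr_left
          intro code _
          show writeIL ((c :: cs).set 0 _) ((ilpos cs).map (· + 1)) code = _
          rw [List.set_cons_zero, writeIL_cons_shift]
          rfl
        · rw [List.map_map]
          apply List.map_congr_left
          intro code _
          show writeIL ((c :: cs).set 0 _) ((ilpos cs).map (· + 1)) code = _
          rw [List.set_cons_zero, writeIL_cons_shift]
          rfl
    · rw [show expandSpec (c :: cs) = (expandSpec cs).map (c :: ·) by
        rw [expandSpec]; rw [if_neg (by tauto)]]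
      simp only [ilpos, if_neg hc, List.length_map]
      rw [← ih, List.map_map]
      apply List.map_congr_left
      intro code _
      exact writeIL_cons_shift c (ilpos cs) code cs

-- assembly
theorem isIn_single (c : Char) (pep : String) :
    PySem.Str.isIn (String.ofList [c]) pep = true ↔ c ∈ pep.toList := by
  rw [PySem.Str.isIn_iff_infix]
  simp [List.singleton_infix_iff]

theorem A_eq_expand (pep : String) : ILExtend pep = (expandSpec pep.toList).map String.ofList := by
  unfold ILExtend
  by_cases hg : ¬ PySem.Str.isIn "L" pep ∧ ¬ PySem.Str.isIn "I" pep
  · rw [if_pos hg]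
    have hL : 'L' ∉ pep.toList := by
      rw [← isIn_single 'L' pep]; simpa using hg.1
    have hI : 'I' ∉ pep.toList := by
      rw [← isIn_single 'I' pep]; simpa using hg.2
    have h0 := core pep.toList
    rw [ilpos_nil_of_not_mem _ hL hI] at h0
    simp [codes, pvBin_zero, pvZfill, writeIL] at h0
    rw [← h0]
    simp
  · rw [if_neg hg]
    simp only
    rw [pos_eq_ilpos]
    have hmem : 'L' ∈ pep.toList ∨ 'I' ∈ pep.toList := by
      rw [← isIn_single 'L' pep, ← isIn_single 'I' pep]
      by_contra hn
      push Not at hn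
      exact hg ⟨by simpa using hn.1, by simpa using hn.2⟩
    have hk1 : 1 ≤ (ilpos pep.toList).length := by
      have := ilpos_ne_nil pep.toList hmem
      cases h : ilpos pep.toList with
      | nil => exact absurd h this
      | cons a as => simp
    have hnd : (ilpos pep.toList).Nodup := (ilpos_pairwise pep.toList).imp Nat.ne_of_lt
    rw [main_fold pep.toList (ilpos pep.toList) hnd hk1 _ _ []
      (fun i hi => List.mem_range.mp hi) (fun c _ => rfl)]
    rw [← core pep.toList]
    simp [codes, List.map_map, Function.comp_def]

-- ===== VERDICT (by name: the statement is the Claim_ definition above) =====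
theorem ILExtend_spec : Claim_equal_ILExtend := by
  intro pep _
  unfold Spec_ILExtend
  rw [A_eq_expand, alt_eq_expand]
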